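-- pv_equiv track=rewrite | github.com/dosatos/LeetCode | Medium/array_card_flipping_game.py | flipgame
-- ===== SOURCE A (Python) =====
-- def flipgame(fronts, backs):
--     """
--     :type fronts: List[int]
--     :type backs: List[int]
--     :rtype: int
--     """
--     forbidden = []
--     candidates = {}
--     for i in range(len(fronts)):
--         f = fronts[i]
--         b = backs[i]
--         if f != b:
--             if f not in forbidden:
--                 candidates[f] = 1
--             if b not in forbidden:
--                 candidates[b] = 1
--         else:
--             forbidden.append(f)
--             if f in candidates:
--                 del candidates[f]
--     if candidates:
--         return min(candidates.keys())
--     return 0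
-- ===== SOURCE B (Python) =====
-- def flipgame(fronts, backs):
--     pairs = list(zip(fronts, backs))
--     forbidden = {f for f, b in pairs if f == b}
--     candidates = [v for f, b in pairs if f != b for v in (f, b) if v not in forbidden]
--     return min(candidates) if candidates else 0
-- ===== Notes on version B (the rewrite author's own statement) =====
-- stated objective: simpler
-- what changed: Replaces A's single pass that maintains a growing forbidden list (with O(n) membership scans) and a candidate dict with mid-loop deletions by two independent passes: first build the forbidden set of equal-sided values, then filter all values of differing cards against it and take the minimum.
import Mathlib
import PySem

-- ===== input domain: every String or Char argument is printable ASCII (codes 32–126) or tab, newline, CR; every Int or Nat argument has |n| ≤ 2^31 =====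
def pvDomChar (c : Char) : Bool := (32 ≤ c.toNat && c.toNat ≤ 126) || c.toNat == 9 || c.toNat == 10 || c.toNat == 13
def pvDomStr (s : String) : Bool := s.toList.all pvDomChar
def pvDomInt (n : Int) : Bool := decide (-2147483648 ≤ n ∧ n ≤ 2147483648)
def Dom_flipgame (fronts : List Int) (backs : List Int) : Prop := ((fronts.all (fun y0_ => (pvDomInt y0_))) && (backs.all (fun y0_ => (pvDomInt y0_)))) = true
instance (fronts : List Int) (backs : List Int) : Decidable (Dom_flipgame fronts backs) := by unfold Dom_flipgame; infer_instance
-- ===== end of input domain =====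

-- B replaces A's single maintain-and-retract pass (forbidden list + candidate dict with
-- mid-loop deletions) by two independent passes: build the forbidden set, then filter and take the min.

-- ===== PORT A =====
-- one iteration of A's loop body, state = (forbidden, candidates)
def flipgameStep (st : List Int × PySem.Dict Int Int) (f b : Int) : List Int × PySem.Dict Int Int :=
  if f ≠ b then
    let cand1 := if f ∈ st.1 then st.2 else st.2.insert f 1
    let cand2 := if b ∈ st.1 then cand1 else cand1.insert b 1
    (st.1, cand2)
  else
    (st.1 ++ [f], st.2.erase f)

def flipgame (fronts : List Int) (backs : List Int) : Int :=
  let st := (List.range fronts.length).foldl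
    (fun st i =>
      flipgameStep st (PySem.List.pyGetD fronts (Int.ofNat i) 0) (PySem.List.pyGetD backs (Int.ofNat i) 0))
    ([], PySem.Dict.empty)
  if st.2.size ≠ 0 then (PySem.List.min? st.2.keys (fun x => x)).getD 0 else 0

-- ===== PORT B =====
def altForbidden (pairs : List (Int × Int)) : PySem.Set Int :=
  PySem.Set.ofList ((pairs.filter (fun p => p.1 == p.2)).map (fun p => p.1))

def altCandidates (pairs : List (Int × Int)) : List Int :=
  pairs.flatMap
    (fun p => if p.1 ≠ p.2 then [p.1, p.2].filter (fun v => ¬ PySem.Set.contains (altForbidden pairs) v) else [])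

def flipgame_alt (fronts : List Int) (backs : List Int) : Int :=
  match PySem.List.min? (altCandidates (fronts.zip backs)) (fun x => x) with
  | some m => m
  | none => 0

-- ===== PRECONDITION & SPEC =====
-- A reads backs[i] for every i < len(fronts): it raises IndexError when backs is shorter than fronts.
def Pre_flipgame (fronts : List Int) (backs : List Int) : Prop := fronts.length ≤ backs.length
instance (fronts : List Int) (backs : List Int) : Decidable (Pre_flipgame fronts backs) := by unfold Pre_flipgame; infer_instance
def pvWitness_flipgame : List Int × List Int := ([1, 2, 4, 4, 7], [1, 3, 4, 1, 3])

def Spec_flipgame (fronts : List Int) (backs : List Int) (out : Int) : Prop := out = flipgame_alt fronts backs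
instance (fronts : List Int) (backs : List Int) (out : Int) : Decidable (Spec_flipgame fronts backs out) := by unfold Spec_flipgame; infer_instance

-- ===== CLAIM (what is proved, stated in full; the proofs are below) =====
def Claim_equal_flipgame : Prop := ∀ (fronts : List Int) (backs : List Int), Dom_flipgame fronts backs → Pre_flipgame fronts backs → Spec_flipgame fronts backs (flipgame fronts backs)
-- ===== LEMMAS AND PROOFS =====

-- the list of front values of the equal-sided pairs of P (A's final `forbidden` list)
def eqVals (P : List (Int × Int)) : List Int := (P.filter (fun p => p.1 == p.2)).map (fun p => p.1)

-- all values occurring on a differing card of P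
def diffVals (P : List (Int × Int)) : List Int := P.flatMap (fun p => if p.1 ≠ p.2 then [p.1, p.2] else [])

lemma contains_erase (d : PySem.Dict Int Int) (k v : Int) :
    (d.erase k).contains v = (!(v == k) && d.contains v) := by
  simp only [PySem.Dict.erase, PySem.Dict.contains, List.any_filter]
  cases h : (v == k) with
  | false =>
    simp only [Bool.not_false, Bool.true_and]
    apply PySem.List.any_congr_mem
    intro p _
    have hv : v ≠ k := by simpa using h
    by_cases hp : p.1 = k <;> by_cases hq : p.1 = v <;> simp_all
  | true =>
    have : v = k := by simpa using h
    subst this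
    simp only [Bool.not_true, Bool.false_and]
    apply List.any_eq_false.mpr
    intro p _
    by_cases hp : p.1 = v <;> simp_all

-- A's fold over `range len(fronts)` with indexing is the fold over the zip (when backs is long enough)
lemma foldl_range_getD {σ : Type} (g : σ → Int → Int → σ) :
    ∀ (fronts backs : List Int) (init : σ), fronts.length ≤ backs.length →
    (List.range fronts.length).foldl
      (fun st i => g st (PySem.List.pyGetD fronts (Int.ofNat i) 0) (PySem.List.pyGetD backs (Int.ofNat i) 0)) init
    = (fronts.zip backs).foldl (fun st p => g st p.1 p.2) init := by
  intro fronts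
  induction fronts with
  | nil => intro backs init _; simp
  | cons f fs ih =>
    intro backs init hlen
    cases backs with
    | nil => simp at hlen
    | cons b bs =>
      simp only [List.length_cons, List.range_succ_eq_map, List.foldl_cons, List.foldl_map,
        List.zip_cons_cons]
      have h0 : ∀ (xs : List Int) (x : Int) (i : Nat),
          PySem.List.pyGetD (x :: xs) (Int.ofNat (i + 1)) 0 = PySem.List.pyGetD xs (Int.ofNat i) 0 := by
        intro xs x i
        rw [show Int.ofNat (i + 1) = ((i + 1 : Nat) : Int) from rfl,
            show Int.ofNat i = ((i : Nat) : Int) from rfl,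
            PySem.List.pyGetD_natCast, PySem.List.pyGetD_natCast]
        simp
      have h1 : PySem.List.pyGetD (f :: fs) (Int.ofNat 0) 0 = f := by
        rw [show Int.ofNat 0 = ((0 : Nat) : Int) from rfl, PySem.List.pyGetD_natCast]; rfl
      have h2 : PySem.List.pyGetD (b :: bs) (Int.ofNat 0) 0 = b := by
        rw [show Int.ofNat 0 = ((0 : Nat) : Int) from rfl, PySem.List.pyGetD_natCast]; rfl
      rw [h1, h2]
      have := ih bs (g init f b) (by simpa using hlen)
      rw [← this]
      refine PySem.List.foldl_congr_mem _ _ _ _ ?_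
      intro acc i _
      rw [h0, h0]

-- characterisation of A's loop: forbidden accumulates eqVals, and a value is a candidate key
-- iff it was there initially or occurs on a differing card outside F, and is no equal-sided value
lemma loopA_char : ∀ (P : List (Int × Int)) (F : List Int) (d : PySem.Dict Int Int),
    (∀ v ∈ F, d.contains v = false) →
    (P.foldl (fun st p => flipgameStep st p.1 p.2) (F, d)).1 = F ++ eqVals P ∧
    ∀ v, ((P.foldl (fun st p => flipgameStep st p.1 p.2) (F, d)).2.contains v = true ↔
      ((d.contains v = true ∨ (v ∈ diffVals P ∧ v ∉ F)) ∧ v ∉ eqVals P)) := by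
  intro P
  induction P with
  | nil =>
    intro F d hF
    refine ⟨by simp [eqVals], fun v => ?_⟩
    simp only [List.foldl_nil, eqVals, diffVals]
    constructor
    · intro h; exact ⟨Or.inl h, by simp⟩
    · rintro ⟨h | ⟨h, _⟩, _⟩
      · exact h
      · simp at h
  | cons p P ih =>
    rintro F d hF
    obtain ⟨f, b⟩ := p
    by_cases hfb : f = b
    · -- equal-sided pair: forbidden grows, f erased from candidates
      subst hfb
      have hstep : flipgameStep (F, d) f f = (F ++ [f], d.erase f) := by
        simp [flipgameStep]
      simp only [List.foldl_cons, hstep]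
      have hF' : ∀ v ∈ F ++ [f], (d.erase f).contains v = false := by
        intro v hv
        rw [contains_erase]
        rcases List.mem_append.mp hv with h | h
        · simp [hF v h]
        · simp at h; simp [h]
      obtain ⟨h1, h2⟩ := ih (F ++ [f]) (d.erase f) hF'
      have heq : eqVals ((f, f) :: P) = f :: eqVals P := by simp [eqVals]
      have hdv : diffVals ((f, f) :: P) = diffVals P := by simp [diffVals]
      refine ⟨by rw [h1, heq]; simp, fun v => ?_⟩
      rw [h2 v, heq, hdv]
      have hce : (d.erase f).contains v = true ↔ (v ≠ f ∧ d.contains v = true) := by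
        rw [contains_erase]; cases h : (v == f) <;> simp_all
      rw [hce]
      simp only [List.mem_append, List.mem_cons, List.not_mem_nil]
      tauto
    · -- differing pair: f and b inserted when not forbidden
      have hstep : flipgameStep (F, d) f b =
          (F, if b ∈ F then (if f ∈ F then d else d.insert f 1)
              else (if f ∈ F then d else d.insert f 1).insert b 1) := by
        simp [flipgameStep, hfb]
      simp only [List.foldl_cons, hstep]
      set d1 : PySem.Dict Int Int := if f ∈ F then d else d.insert f 1 with hd1
      set d2 : PySem.Dict Int Int := if b ∈ F then d1 else d1.insert b 1 with hd2
      have hc1 : ∀ v, d1.contains v = true ↔ (d.contains v = true ∨ (v = f ∧ f ∉ F)) := by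
        intro v
        rw [hd1]
        split_ifs with h
        · constructor
          · exact Or.inl
          · rintro (hc | ⟨rfl, hnf⟩)
            · exact hc
            · exact absurd h hnf
        · rw [PySem.Dict.contains_insert]
          cases hvf : (v == f) <;> simp_all
      have hc2 : ∀ v, d2.contains v = true ↔
          (d.contains v = true ∨ (v = f ∧ f ∉ F) ∨ (v = b ∧ b ∉ F)) := by
        intro v
        rw [hd2]
        split_ifs with h
        · rw [hc1 v]
          constructor
          · rintro (hc | hv)
            · exact Or.inl hc
            · exact Or.inr (Or.inl hv)
          · rintro (hc | hv | ⟨rfl, hnb⟩)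
            · exact Or.inl hc
            · exact Or.inr hv
            · exact absurd h hnb
        · rw [PySem.Dict.contains_insert]
          cases hvb : (v == b)
          · simp only [Bool.false_or]
            rw [hc1 v]
            simp at hvb
            constructor
            · rintro (hc | hv)
              · exact Or.inl hc
              · exact Or.inr (Or.inl hv)
            · rintro (hc | hv | ⟨rfl, _⟩)
              · exact Or.inl hc
              · exact Or.inr hv
              · exact absurd rfl hvb
          · simp at hvb
            subst hvb
            simp [h]
      have hF2 : ∀ v ∈ F, d2.contains v = false := by
        intro v hv
        cases h : d2.contains v
        · rfl
        · exfalso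
          rcases (hc2 v).mp h with hc | ⟨rfl, hnf⟩ | ⟨rfl, hnb⟩
          · rw [hF v hv] at hc; exact Bool.false_ne_true hc
          · exact hnf hv
          · exact hnb hv
      obtain ⟨h1, h2⟩ := ih F d2 hF2
      refine ⟨by rw [h1]; simp [eqVals, hfb], fun v => ?_⟩
      rw [h2 v]
      have heq : eqVals ((f, b) :: P) = eqVals P := by simp [eqVals, hfb]
      have hdv : diffVals ((f, b) :: P) = f :: b :: diffVals P := by
        simp [diffVals, hfb]
      rw [heq, hdv]
      constructor
      · rintro ⟨hc | ⟨hd, hnf⟩, hne⟩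
        · rcases (hc2 v).mp hc with h | ⟨rfl, hnf⟩ | ⟨rfl, hnb⟩
          · exact ⟨Or.inl h, hne⟩
          · exact ⟨Or.inr ⟨by simp, hnf⟩, hne⟩
          · exact ⟨Or.inr ⟨by simp, hnb⟩, hne⟩
        · exact ⟨Or.inr ⟨by simp [hd], hnf⟩, hne⟩
      · rintro ⟨hc | ⟨hd, hnf⟩, hne⟩
        · exact ⟨Or.inl ((hc2 v).mpr (Or.inl hc)), hne⟩
        · simp only [List.mem_cons] at hd
          rcases hd with rfl | rfl | hd
          · exact ⟨Or.inl ((hc2 v).mpr (Or.inr (Or.inl ⟨rfl, hnf⟩))), hne⟩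
          · exact ⟨Or.inl ((hc2 v).mpr (Or.inr (Or.inr ⟨rfl, hnf⟩))), hne⟩
          · exact ⟨Or.inr ⟨hd, hnf⟩, hne⟩

-- min over two lists with the same members is the same (Int minimum is a unique value)
lemma min?_congr_mem (xs ys : List Int) (h : ∀ v, v ∈ xs ↔ v ∈ ys) :
    PySem.List.min? xs (fun x => x) = PySem.List.min? ys (fun x => x) := by
  cases hx : PySem.List.min? xs (fun x => x) with
  | none =>
    have : xs = [] := (PySem.List.min?_eq_none_iff xs _).mp hx
    subst this
    have hys : ys = [] := by
      cases ys with
      | nil => rfl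
      | cons y t => exact absurd ((h y).mpr (by simp)) (by simp)
    rw [hys]
    exact hx.symm
  | some m =>
    have hmx := PySem.List.min?_mem hx
    have hmin := PySem.List.min?_isMin hx
    cases hy : PySem.List.min? ys (fun x => x) with
    | none =>
      have : ys = [] := (PySem.List.min?_eq_none_iff ys _).mp hy
      subst this
      exact absurd ((h m).mp hmx) (by simp)
    | some m' =>
      have hmy := PySem.List.min?_mem hy
      have hmin' := PySem.List.min?_isMin hy
      have h1 : m ≤ m' := hmin m' ((h m').mpr hmy)
      have h2 : m' ≤ m := hmin' m ((h m).mp hmx)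
      exact congrArg some (le_antisymm h1 h2)

-- B's candidate list has exactly the members A's characterisation describes
lemma alt_candidates_mem (P : List (Int × Int)) (v : Int) :
    v ∈ altCandidates P ↔ (v ∈ diffVals P ∧ v ∉ eqVals P) := by
  have hset : ∀ w : Int, PySem.Set.contains (altForbidden P) w = true ↔ w ∈ eqVals P := by
    intro w
    rw [show PySem.Set.contains (altForbidden P) w = List.contains (altForbidden P) w from rfl,
        List.contains_iff_mem]
    exact PySem.Set.mem_ofList _ w
  simp only [altCandidates, List.mem_flatMap, diffVals]
  constructor
  · rintro ⟨p, hp, hv⟩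
    split_ifs at hv with hne
    · simp only [List.mem_filter, decide_not] at hv
      obtain ⟨hv1, hv2⟩ := hv
      refine ⟨⟨p, hp, ?_⟩, ?_⟩
      · rw [if_pos hne]; exact hv1
      · intro hmem
        have hc : PySem.Set.contains (altForbidden P) v = true := by
          rw [show PySem.Set.contains (altForbidden P) v = List.contains (altForbidden P) v from rfl,
              List.contains_iff_mem]
          exact (PySem.Set.mem_ofList (eqVals P) v).mpr hmem
        rw [hc] at hv2
        simp at hv2
    · simp at hv
  · rintro ⟨⟨p, hp, hv⟩, hne⟩
    refine ⟨p, hp, ?_⟩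
    split_ifs at hv ⊢ with h
    · simp only [List.mem_filter, decide_not]
      refine ⟨hv, ?_⟩
      cases hc : PySem.Set.contains (altForbidden P) v
      · simp
      · exact absurd ((hset v).mp hc) hne
    · simp at hv

lemma keys_nonempty_iff_size (d : PySem.Dict Int Int) : d.size ≠ 0 ↔ d.keys ≠ [] := by
  rw [show d.size = d.items.length from rfl, show d.keys = d.items.map (fun p => p.1) from rfl]
  cases d.items <;> simp

-- ===== VERDICT (by name: the statement is the Claim_ definition above) =====
theorem flipgame_spec : Claim_equal_flipgame := by
  intro fronts backs _ hpre
  unfold Spec_flipgame flipgame flipgame_alt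
  rw [show (fun (st : List Int × PySem.Dict Int Int) (i : Nat) =>
      flipgameStep st (PySem.List.pyGetD fronts (Int.ofNat i) 0) (PySem.List.pyGetD backs (Int.ofNat i) 0))
      = (fun st i => (fun st f b => flipgameStep st f b) st (PySem.List.pyGetD fronts (Int.ofNat i) 0)
          (PySem.List.pyGetD backs (Int.ofNat i) 0)) from rfl]
  rw [foldl_range_getD (fun st f b => flipgameStep st f b) fronts backs ([], PySem.Dict.empty) hpre]
  set P := fronts.zip backs with hP
  obtain ⟨-, hchar⟩ := loopA_char P [] PySem.Dict.empty (by intro v hv; simp at hv)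
  set d := (P.foldl (fun st p => flipgameStep st p.1 p.2) ([], PySem.Dict.empty)).2 with hd
  have hmem : ∀ v, v ∈ d.keys ↔ (v ∈ diffVals P ∧ v ∉ eqVals P) := by
    intro v
    rw [← PySem.Dict.contains_iff_mem_keys]
    have := hchar v
    simpa using this
  have hmm : ∀ v, v ∈ d.keys ↔ v ∈ altCandidates P := by
    intro v; rw [hmem v, alt_candidates_mem]
  have hmin := min?_congr_mem d.keys (altCandidates P) hmm
  by_cases hsz : d.size ≠ 0
  · rw [if_pos hsz]
    have hk : d.keys ≠ [] := (keys_nonempty_iff_size d).mp hsz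
    cases hx : PySem.List.min? d.keys (fun x => x) with
    | none => exact absurd ((PySem.List.min?_eq_none_iff _ _).mp hx) hk
    | some m =>
      rw [hx] at hmin
      rw [← hmin]
      rfl
  · rw [if_neg hsz]
    rw [not_not] at hsz
    have hk : d.keys = [] := by
      by_contra hne
      exact ((keys_nonempty_iff_size d).mpr hne) hsz
    rw [hk] at hmin
    rw [show PySem.List.min? ([] : List Int) (fun x => x) = none from rfl] at hmin
    rw [← hmin]
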